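-- pv_equiv track=rewrite | github.com/the-omega-institute/automath | theory/2026_golden_ratio_driven_scan_projection_generation_recursive_emergence/scripts/exp_xi_p7_dyadic_integral_basis_certificate.py | _newton_power_sums_monic_deg5
-- ===== SOURCE A (Python) =====
-- from typing import Dict, Iterable, List, Sequence, Tuple
--
-- def _newton_power_sums_monic_deg5(coeffs_c4_to_c0: Sequence[int], m_max: int) -> List[int]:
--     """Return s_m = sum r_i^m for m=0..m_max (integer), for monic degree-5 polynomial.
--
--     Polynomial: x^5 + c4 x^4 + c3 x^3 + c2 x^2 + c1 x + c0.
--     """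
--     if len(coeffs_c4_to_c0) != 5:
--         raise ValueError("need c4..c0")
--     c4, c3, c2, c1, c0 = [int(z) for z in coeffs_c4_to_c0]
--     s: List[int] = [0] * (m_max + 1)
--     s[0] = 5
--     # Newton identities.
--     for m in range(1, m_max + 1):
--         if m == 1:
--             s[m] = -c4
--         elif m == 2:
--             s[m] = -(c4 * s[1] + 2 * c3)
--         elif m == 3:
--             s[m] = -(c4 * s[2] + c3 * s[1] + 3 * c2)
--         elif m == 4:
--             s[m] = -(c4 * s[3] + c3 * s[2] + c2 * s[1] + 4 * c1)
--         elif m == 5: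
--             s[m] = -(c4 * s[4] + c3 * s[3] + c2 * s[2] + c1 * s[1] + 5 * c0)
--         else:
--             s[m] = -(c4 * s[m - 1] + c3 * s[m - 2] + c2 * s[m - 3] + c1 * s[m - 4] + c0 * s[m - 5])
--     return s
-- ===== SOURCE B (Python) =====
-- def _newton_power_sums_monic_deg5(coeffs_c4_to_c0, m_max):
--     """Power sums via reduction in the quotient ring Z[x]/(p): keep the
--     coefficient vector r of x^m mod p (a linear-feedback shift step per m)
--     and pair it with the base power sums s0..s4 given by Girard's closed
--     formulas; no Newton recurrence over previous outputs."""
--     if len(coeffs_c4_to_c0) != 5: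
--         raise ValueError("need c4..c0")
--     c4, c3, c2, c1, c0 = [int(z) for z in coeffs_c4_to_c0]
--     # Girard's closed forms for the base power sums s0..s4.
--     t0 = 5
--     t1 = -c4
--     t2 = c4 * c4 - 2 * c3
--     t3 = -c4 ** 3 + 3 * c4 * c3 - 3 * c2
--     t4 = c4 ** 4 - 4 * c4 * c4 * c3 + 2 * c3 * c3 + 4 * c4 * c2 - 4 * c1
--     out = [5]
--     r = (0, 1, 0, 0, 0)  # x^1 mod p
--     for _ in range(m_max):
--         a0, a1, a2, a3, a4 = r
--         out.append(a0 * t0 + a1 * t1 + a2 * t2 + a3 * t3 + a4 * t4)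
--         r = (-a4 * c0, a0 - a4 * c1, a1 - a4 * c2, a2 - a4 * c3, a3 - a4 * c4)
--     return out
-- ===== Notes on version B (the rewrite author's own statement) =====
-- stated objective: alternative
-- what changed: Instead of Newton's identities recurring on the last five outputs, B works in the quotient ring Z[x]/(p): it keeps the 5-coefficient vector of x^m mod p, advances it by one linear-feedback shift step per m, and obtains each s_m as its dot product with the base power sums s0..s4 computed once by Girard's closed formulas.
import Mathlib
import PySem

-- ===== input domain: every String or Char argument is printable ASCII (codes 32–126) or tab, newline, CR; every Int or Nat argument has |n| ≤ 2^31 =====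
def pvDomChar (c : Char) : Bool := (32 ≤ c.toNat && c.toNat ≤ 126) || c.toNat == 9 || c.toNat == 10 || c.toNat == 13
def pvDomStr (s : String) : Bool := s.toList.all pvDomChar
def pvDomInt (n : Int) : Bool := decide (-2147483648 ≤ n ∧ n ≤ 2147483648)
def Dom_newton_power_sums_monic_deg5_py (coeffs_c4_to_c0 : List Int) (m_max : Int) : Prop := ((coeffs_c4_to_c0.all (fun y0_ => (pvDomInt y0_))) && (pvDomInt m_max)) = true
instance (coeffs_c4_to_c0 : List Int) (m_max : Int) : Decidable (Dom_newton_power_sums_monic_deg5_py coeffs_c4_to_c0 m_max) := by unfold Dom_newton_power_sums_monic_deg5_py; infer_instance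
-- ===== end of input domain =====

-- B replaces A's Newton-identities recurrence (each s_m from the five previous outputs) by
-- arithmetic in Z[x]/(p): a linear-feedback shift of the coefficient vector of x^m mod p,
-- dotted with the base power sums s0..s4 from Girard's closed formulas (objective: alternative).

-- ===== PORT A =====
-- one iteration of A's loop body: the unrolled if/elif chain, writing s[m] in place
def pvA_step (c4 c3 c2 c1 c0 : Int) (s : List Int) (m : Int) : List Int :=
  let g : Int → Int := fun i => s.getD i.toNat 0   -- s[i], index always ≥ 0 and in range here
  if m = 1 then s.set m.toNat (-c4)
  else if m = 2 then s.set m.toNat (-(c4 * g 1 + 2 * c3))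
  else if m = 3 then s.set m.toNat (-(c4 * g 2 + c3 * g 1 + 3 * c2))
  else if m = 4 then s.set m.toNat (-(c4 * g 3 + c3 * g 2 + c2 * g 1 + 4 * c1))
  else if m = 5 then s.set m.toNat (-(c4 * g 4 + c3 * g 3 + c2 * g 2 + c1 * g 1 + 5 * c0))
  else s.set m.toNat (-(c4 * g (m-1) + c3 * g (m-2) + c2 * g (m-3) + c1 * g (m-4) + c0 * g (m-5)))

def newton_power_sums_monic_deg5_py (coeffs_c4_to_c0 : List Int) (m_max : Int) : List Int :=
  match coeffs_c4_to_c0 with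
  | [c4, c3, c2, c1, c0] =>
      -- s = [0]*(m_max+1); s[0] = 5  (for m_max < 0 Python raises IndexError: outside Pre_)
      let s0 := (List.replicate (m_max + 1).toNat (0:Int)).set 0 5
      (PySem.List.pyRange 1 (m_max + 1) 1).foldl (pvA_step c4 c3 c2 c1 c0) s0
  | _ => []  -- Python raises ValueError: outside Pre_

-- ===== PORT B =====
-- one iteration of B's loop: append r·(t0..t4), then one LFSR step on r = x^m mod p
def pvB_step (c0 c1 c2 c3 c4 t0 t1 t2 t3 t4 : Int)
    (st : List Int × (Int × Int × Int × Int × Int)) (_m : Int) :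
    List Int × (Int × Int × Int × Int × Int) :=
  match st with
  | (out, (a0, a1, a2, a3, a4)) =>
    (out ++ [a0 * t0 + a1 * t1 + a2 * t2 + a3 * t3 + a4 * t4],
     (-a4 * c0, a0 - a4 * c1, a1 - a4 * c2, a2 - a4 * c3, a3 - a4 * c4))

def newton_power_sums_monic_deg5_py_alt (coeffs_c4_to_c0 : List Int) (m_max : Int) : List Int :=
  if coeffs_c4_to_c0.length = 5 then
    -- c4, c3, c2, c1, c0 = coeffs (unpack after the length check; indices exact)
    let c4 := coeffs_c4_to_c0.getD 0 0
    let c3 := coeffs_c4_to_c0.getD 1 0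
    let c2 := coeffs_c4_to_c0.getD 2 0
    let c1 := coeffs_c4_to_c0.getD 3 0
    let c0 := coeffs_c4_to_c0.getD 4 0
    -- Girard's closed forms for the base power sums s0..s4
    let t0 : Int := 5
    let t1 : Int := -c4
    let t2 : Int := c4 * c4 - 2 * c3
    let t3 : Int := -c4 ^ 3 + 3 * c4 * c3 - 3 * c2
    let t4 : Int := c4 ^ 4 - 4 * c4 * c4 * c3 + 2 * c3 * c3 + 4 * c4 * c2 - 4 * c1
    ((PySem.List.pyRange 0 m_max 1).foldl (pvB_step c0 c1 c2 c3 c4 t0 t1 t2 t3 t4)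
      ([5], (0, 1, 0, 0, 0))).1
  else []  -- Python raises ValueError: outside Pre_

-- ===== PRECONDITION & SPEC =====
-- A raises ValueError unless exactly 5 coefficients are given, and IndexError (s[0] on an
-- empty list) when m_max < 0; exactly those inputs are excluded.
def Pre_newton_power_sums_monic_deg5_py (coeffs_c4_to_c0 : List Int) (m_max : Int) : Prop :=
  coeffs_c4_to_c0.length = 5 ∧ 0 ≤ m_max
instance (coeffs_c4_to_c0 : List Int) (m_max : Int) : Decidable (Pre_newton_power_sums_monic_deg5_py coeffs_c4_to_c0 m_max) := by unfold Pre_newton_power_sums_monic_deg5_py; infer_instance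
def pvWitness_newton_power_sums_monic_deg5_py : List Int × Int := ([1, -2, 3, 0, -7], 9)

def Spec_newton_power_sums_monic_deg5_py (coeffs_c4_to_c0 : List Int) (m_max : Int) (out : List Int) : Prop := out = newton_power_sums_monic_deg5_py_alt coeffs_c4_to_c0 m_max
instance (coeffs_c4_to_c0 : List Int) (m_max : Int) (out : List Int) : Decidable (Spec_newton_power_sums_monic_deg5_py coeffs_c4_to_c0 m_max out) := by unfold Spec_newton_power_sums_monic_deg5_py; infer_instance

-- ===== CLAIM (what is proved, stated in full; the proofs are below) =====
def Claim_equal_newton_power_sums_monic_deg5_py : Prop := ∀ (coeffs_c4_to_c0 : List Int) (m_max : Int), Dom_newton_power_sums_monic_deg5_py coeffs_c4_to_c0 m_max → Pre_newton_power_sums_monic_deg5_py coeffs_c4_to_c0 m_max → Spec_newton_power_sums_monic_deg5_py coeffs_c4_to_c0 m_max (newton_power_sums_monic_deg5_py coeffs_c4_to_c0 m_max)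
-- ===== LEMMAS AND PROOFS =====

-- the common value both programs compute: the Newton power-sum sequence of the polynomial
def pvF (c4 c3 c2 c1 c0 : Int) : Nat → Int
  | 0 => 5
  | 1 => -c4
  | 2 => -(c4 * pvF c4 c3 c2 c1 c0 1 + 2 * c3)
  | 3 => -(c4 * pvF c4 c3 c2 c1 c0 2 + c3 * pvF c4 c3 c2 c1 c0 1 + 3 * c2)
  | 4 => -(c4 * pvF c4 c3 c2 c1 c0 3 + c3 * pvF c4 c3 c2 c1 c0 2 + c2 * pvF c4 c3 c2 c1 c0 1 + 4 * c1)
  | 5 => -(c4 * pvF c4 c3 c2 c1 c0 4 + c3 * pvF c4 c3 c2 c1 c0 3 + c2 * pvF c4 c3 c2 c1 c0 2 + c1 * pvF c4 c3 c2 c1 c0 1 + 5 * c0)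
  | (n+6) => -(c4 * pvF c4 c3 c2 c1 c0 (n+5) + c3 * pvF c4 c3 c2 c1 c0 (n+4) + c2 * pvF c4 c3 c2 c1 c0 (n+3) + c1 * pvF c4 c3 c2 c1 c0 (n+2) + c0 * pvF c4 c3 c2 c1 c0 (n+1))

-- the pure 5-term recurrence holds from index 5 on
lemma pvF_rec (c4 c3 c2 c1 c0 : Int) (n : Nat) :
    pvF c4 c3 c2 c1 c0 (n+5) = -(c4 * pvF c4 c3 c2 c1 c0 (n+4) + c3 * pvF c4 c3 c2 c1 c0 (n+3)
      + c2 * pvF c4 c3 c2 c1 c0 (n+2) + c1 * pvF c4 c3 c2 c1 c0 (n+1) + c0 * pvF c4 c3 c2 c1 c0 n) := by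
  cases n with
  | zero => show pvF c4 c3 c2 c1 c0 5 = _; simp [pvF]; ring
  | succ k => rfl

lemma pv_set_append_len (l₁ l₂ : List Int) (a : Int) :
    (l₁ ++ l₂).set l₁.length a = l₁ ++ l₂.set 0 a := by
  induction l₁ with
  | nil => simp
  | cons b t ih => simp [ih]

-- reading s[i] (i < m) from the prefix of already-computed values
lemma pv_readf (c4 c3 c2 c1 c0 : Int) (zs : List Int) (m i : Nat) (h : i < m) :
    (((List.range m).map (pvF c4 c3 c2 c1 c0)) ++ (0:Int) :: zs).getD i 0
      = pvF c4 c3 c2 c1 c0 i := by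
  rw [List.getD_eq_getElem?_getD, List.getElem?_append_left (by simpa using h)]
  simp [h]

-- A's loop body writes exactly pvF m
lemma pvA_stepf (c4 c3 c2 c1 c0 : Int) (m : Nat) (h1 : 1 ≤ m) (zs : List Int) :
    pvA_step c4 c3 c2 c1 c0 (((List.range m).map (pvF c4 c3 c2 c1 c0)) ++ 0 :: zs) (m : Int)
      = ((List.range (m+1)).map (pvF c4 c3 c2 c1 c0)) ++ zs := by
  have hset : ∀ v : Int,
      ((((List.range m).map (pvF c4 c3 c2 c1 c0)) ++ 0 :: zs).set ((m:Nat):Int).toNat v)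
        = ((List.range m).map (pvF c4 c3 c2 c1 c0)) ++ v :: zs := by
    intro v
    have hm : (((m:Nat)):Int).toNat = ((List.range m).map (pvF c4 c3 c2 c1 c0)).length := by simp
    rw [hm, pv_set_append_len]; rfl
  have hcases : m = 1 ∨ m = 2 ∨ m = 3 ∨ m = 4 ∨ m = 5 ∨ 6 ≤ m := by omega
  rcases hcases with rfl | rfl | rfl | rfl | rfl | h6
  · simp only [pvA_step]
    rw [if_pos (by norm_num)]
    rw [hset, List.range_succ]
    simp only [List.map_append, List.map_cons, List.map_nil, List.append_assoc,
      List.cons_append, List.nil_append]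
    rfl
  · simp only [pvA_step]
    rw [if_neg (by norm_num), if_pos (by norm_num)]
    rw [show ((1:Int)).toNat = 1 from rfl]
    rw [pv_readf c4 c3 c2 c1 c0 zs 2 1 (by omega)]
    rw [hset, List.range_succ]
    simp only [List.map_append, List.map_cons, List.map_nil, List.append_assoc,
      List.cons_append, List.nil_append]
    rfl
  · simp only [pvA_step]
    rw [if_neg (by norm_num), if_neg (by norm_num), if_pos (by norm_num)]
    rw [show ((2:Int)).toNat = 2 from rfl, show ((1:Int)).toNat = 1 from rfl]
    rw [pv_readf c4 c3 c2 c1 c0 zs 3 2 (by omega), pv_readf c4 c3 c2 c1 c0 zs 3 1 (by omega)]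
    rw [hset, List.range_succ]
    simp only [List.map_append, List.map_cons, List.map_nil, List.append_assoc,
      List.cons_append, List.nil_append]
    rfl
  · simp only [pvA_step]
    rw [if_neg (by norm_num), if_neg (by norm_num), if_neg (by norm_num), if_pos (by norm_num)]
    rw [show ((3:Int)).toNat = 3 from rfl, show ((2:Int)).toNat = 2 from rfl,
      show ((1:Int)).toNat = 1 from rfl]
    rw [pv_readf c4 c3 c2 c1 c0 zs 4 3 (by omega), pv_readf c4 c3 c2 c1 c0 zs 4 2 (by omega),
      pv_readf c4 c3 c2 c1 c0 zs 4 1 (by omega)]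
    rw [hset, List.range_succ]
    simp only [List.map_append, List.map_cons, List.map_nil, List.append_assoc,
      List.cons_append, List.nil_append]
    rfl
  · simp only [pvA_step]
    rw [if_neg (by norm_num), if_neg (by norm_num), if_neg (by norm_num), if_neg (by norm_num),
      if_pos (by norm_num)]
    rw [show ((4:Int)).toNat = 4 from rfl, show ((3:Int)).toNat = 3 from rfl,
      show ((2:Int)).toNat = 2 from rfl, show ((1:Int)).toNat = 1 from rfl]
    rw [pv_readf c4 c3 c2 c1 c0 zs 5 4 (by omega), pv_readf c4 c3 c2 c1 c0 zs 5 3 (by omega),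
      pv_readf c4 c3 c2 c1 c0 zs 5 2 (by omega), pv_readf c4 c3 c2 c1 c0 zs 5 1 (by omega)]
    rw [hset, List.range_succ]
    simp only [List.map_append, List.map_cons, List.map_nil, List.append_assoc,
      List.cons_append, List.nil_append]
    rfl
  · obtain ⟨n, rfl⟩ : ∃ n, m = n + 6 := ⟨m - 6, by omega⟩
    simp only [pvA_step]
    rw [if_neg (by omega), if_neg (by omega), if_neg (by omega), if_neg (by omega),
      if_neg (by omega)]
    rw [show (((n+6:Nat):Int) - 1).toNat = n + 5 by omega,
      show (((n+6:Nat):Int) - 2).toNat = n + 4 by omega,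
      show (((n+6:Nat):Int) - 3).toNat = n + 3 by omega,
      show (((n+6:Nat):Int) - 4).toNat = n + 2 by omega,
      show (((n+6:Nat):Int) - 5).toNat = n + 1 by omega]
    rw [pv_readf c4 c3 c2 c1 c0 zs (n+6) (n+5) (by omega),
      pv_readf c4 c3 c2 c1 c0 zs (n+6) (n+4) (by omega),
      pv_readf c4 c3 c2 c1 c0 zs (n+6) (n+3) (by omega),
      pv_readf c4 c3 c2 c1 c0 zs (n+6) (n+2) (by omega),
      pv_readf c4 c3 c2 c1 c0 zs (n+6) (n+1) (by omega)]
    rw [hset]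
    conv_rhs => rw [List.range_succ]
    simp only [List.map_append, List.map_cons, List.map_nil, List.append_assoc,
      List.cons_append, List.nil_append]
    rfl

-- A's whole loop computes the pvF prefix
lemma pvA_inv (c4 c3 c2 c1 c0 : Int) (N : Nat) :
    ∀ k : Nat, k ≤ N →
      (PySem.List.pyRange 1 ((k:Int)+1) 1).foldl (pvA_step c4 c3 c2 c1 c0)
          (5 :: List.replicate N (0:Int))
        = ((List.range (k+1)).map (pvF c4 c3 c2 c1 c0)) ++ List.replicate (N - k) (0:Int) := by
  intro k
  induction k with
  | zero =>
    intro _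
    rw [PySem.List.pyRange_one_eq_nil (by norm_num)]
    simp [pvF]
  | succ k ih =>
    intro hk
    have hsplit : PySem.List.pyRange 1 ((k:Int)+1+1) 1
        = PySem.List.pyRange 1 ((k:Int)+1) 1 ++ [((k:Int)+1)] := by
      have := PySem.List.pyRange_one_succ_right (a := 1) (b := (k:Int)+1) (by omega)
      simpa using this
    have hrep : List.replicate (N - k) (0:Int) = 0 :: List.replicate (N - (k+1)) 0 := by
      have : N - k = (N - (k+1)) + 1 := by omega
      rw [this, List.replicate_succ]
    push_cast
    rw [hsplit, List.foldl_append, ih (by omega), hrep]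
    simp only [List.foldl]
    have := pvA_stepf c4 c3 c2 c1 c0 (k+1) (by omega) (List.replicate (N - (k+1)) (0:Int))
    push_cast at this
    exact this

-- B's whole loop computes the pvF prefix; r stays the vector of x^(k+1) mod p,
-- expressed as: its dot product with any window of pvF values telescopes
lemma pvB_inv (c4 c3 c2 c1 c0 : Int) (k : Nat) :
    ∃ a0 a1 a2 a3 a4 : Int,
      (PySem.List.pyRange 0 (k:Int) 1).foldl
          (pvB_step c0 c1 c2 c3 c4 5 (-c4) (c4 * c4 - 2 * c3) (-c4 ^ 3 + 3 * c4 * c3 - 3 * c2)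
            (c4 ^ 4 - 4 * c4 * c4 * c3 + 2 * c3 * c3 + 4 * c4 * c2 - 4 * c1))
          ([5], (0, 1, 0, 0, 0))
        = (((List.range (k+1)).map (pvF c4 c3 c2 c1 c0)), (a0, a1, a2, a3, a4))
      ∧ ∀ t : Nat, a0 * pvF c4 c3 c2 c1 c0 t + a1 * pvF c4 c3 c2 c1 c0 (t+1)
          + a2 * pvF c4 c3 c2 c1 c0 (t+2) + a3 * pvF c4 c3 c2 c1 c0 (t+3)
          + a4 * pvF c4 c3 c2 c1 c0 (t+4) = pvF c4 c3 c2 c1 c0 (k+1+t) := by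
  induction k with
  | zero =>
    refine ⟨0, 1, 0, 0, 0, ?_, ?_⟩
    · rw [PySem.List.pyRange_one_eq_nil (by norm_num)]
      simp [pvF]
    · intro t
      rw [show 0+1+t = t+1 by omega]
      ring
  | succ k ih =>
    obtain ⟨a0, a1, a2, a3, a4, hfold, hP⟩ := ih
    have hsplit : PySem.List.pyRange 0 ((k:Int)+1) 1
        = PySem.List.pyRange 0 (k:Int) 1 ++ [(k:Int)] := by
      exact PySem.List.pyRange_one_succ_right (by omega)
    refine ⟨-a4 * c0, a0 - a4 * c1, a1 - a4 * c2, a2 - a4 * c3, a3 - a4 * c4, ?_, ?_⟩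
    · push_cast
      rw [hsplit, List.foldl_append, hfold]
      simp only [List.foldl, pvB_step]
      have hval : a0 * 5 + a1 * (-c4) + a2 * (c4 * c4 - 2 * c3)
          + a3 * (-c4 ^ 3 + 3 * c4 * c3 - 3 * c2)
          + a4 * (c4 ^ 4 - 4 * c4 * c4 * c3 + 2 * c3 * c3 + 4 * c4 * c2 - 4 * c1)
          = pvF c4 c3 c2 c1 c0 (k+1) := by
        have h0 := hP 0
        have f0 : pvF c4 c3 c2 c1 c0 0 = 5 := rfl
        have f1 : pvF c4 c3 c2 c1 c0 1 = -c4 := rfl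
        have f2 : pvF c4 c3 c2 c1 c0 2 = c4 * c4 - 2 * c3 := by simp [pvF]; ring
        have f3 : pvF c4 c3 c2 c1 c0 3 = -c4 ^ 3 + 3 * c4 * c3 - 3 * c2 := by simp [pvF]; ring
        have f4 : pvF c4 c3 c2 c1 c0 4
            = c4 ^ 4 - 4 * c4 * c4 * c3 + 2 * c3 * c3 + 4 * c4 * c2 - 4 * c1 := by
          simp [pvF]; ring
        rw [f0, f1, f2, f3, f4] at h0
        simpa using h0
      rw [hval, List.range_succ (n := k+1)]
      simp
    · intro t
      have H := hP (t+1)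
      have R := pvF_rec c4 c3 c2 c1 c0 t
      have e1 : t + 1 + 1 = t + 2 := by omega
      have e2 : t + 1 + 2 = t + 3 := by omega
      have e3 : t + 1 + 3 = t + 4 := by omega
      have e4 : t + 1 + 4 = t + 5 := by omega
      have e5 : k + 1 + (t + 1) = k + 1 + 1 + t := by omega
      rw [e1, e2, e3, e4, e5] at H
      linear_combination H - a4 * R

-- ===== VERDICT (by name: the statement is the Claim_ definition above) =====
theorem newton_power_sums_monic_deg5_py_spec : Claim_equal_newton_power_sums_monic_deg5_py := by
  intro coeffs m_max _ hpre
  obtain ⟨hlen, hm⟩ := hpre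
  lift m_max to Nat using hm with N
  match coeffs, hlen with
  | [c4, c3, c2, c1, c0], _ =>
    unfold Spec_newton_power_sums_monic_deg5_py
    unfold newton_power_sums_monic_deg5_py newton_power_sums_monic_deg5_py_alt
    simp only []
    have hinit : (List.replicate ((N:Int) + 1).toNat (0:Int)).set 0 5
        = 5 :: List.replicate N (0:Int) := by
      have h : ((N:Int) + 1).toNat = N + 1 := by omega
      rw [h, List.replicate_succ]; simp
    rw [hinit, if_pos (by simp)]
    simp only [List.getD_cons_zero, List.getD_cons_succ]
    obtain ⟨a0, a1, a2, a3, a4, hfold, -⟩ := pvB_inv c4 c3 c2 c1 c0 N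
    have hA := pvA_inv c4 c3 c2 c1 c0 N N le_rfl
    simp only [Nat.sub_self, List.replicate_zero, List.append_nil] at hA
    rw [hA, hfold]
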